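-- pv_equiv track=rewrite | github.com/lunaplush/hope | base.py | almost_double_factorial
-- ===== SOURCE A (Python) =====
-- def almost_double_factorial(n):
--     if n == 0 or n == 1:
--         return 1
--     else:
--         prod = 1
--         for i in range(1, n+1, 2):
--             prod = prod*i
--     return prod
-- ===== SOURCE B (Python) =====
-- from math import factorial
--
--
-- def almost_double_factorial(n):
--     # product of odd numbers up to n via the double-factorial identity
--     # (2k-1)!! = (2k)! / (2^k * k!), with k = number of odd factors
--     k = max(0, (n + 1) // 2)
--     return factorial(2 * k) // (2 ** k * factorial(k))
-- ===== Notes on version B (the rewrite author's own statement) =====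
-- stated objective: alternative
-- what changed: Replaces the iterative product over range(1, n+1, 2) with the closed-form double-factorial identity (2k)!/(2^k*k!) with k = max(0,(n+1)//2), computed via math.factorial with no loop over the odds.
import Mathlib
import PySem

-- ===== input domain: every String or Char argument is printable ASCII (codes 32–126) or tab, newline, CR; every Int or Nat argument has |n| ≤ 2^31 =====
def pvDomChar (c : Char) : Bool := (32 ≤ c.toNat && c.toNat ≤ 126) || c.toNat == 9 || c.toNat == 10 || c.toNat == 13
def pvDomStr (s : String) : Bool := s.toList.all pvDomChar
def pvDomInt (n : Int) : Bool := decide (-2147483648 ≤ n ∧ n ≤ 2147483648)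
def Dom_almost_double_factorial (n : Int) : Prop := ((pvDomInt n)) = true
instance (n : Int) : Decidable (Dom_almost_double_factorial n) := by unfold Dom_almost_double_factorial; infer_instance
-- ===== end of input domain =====

-- B replaces A's loop over the odds with the closed-form double-factorial identity (2k)!/(2^k·k!), k = max(0,(n+1)//2).


-- ===== PORT A =====
def almost_double_factorial (n : Int) : Int :=
  if n = 0 ∨ n = 1 then 1
  else (PySem.List.pyRange 1 (n + 1) 2).foldl (fun prod i => prod * i) 1

-- ===== PORT B =====
def almost_double_factorial_alt (n : Int) : Int :=
  let k : Int := max 0 (PySem.Int.floordiv (n + 1) 2)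
  PySem.Int.floordiv ((2 * k.toNat).factorial : Int) ((2 ^ k.toNat * k.toNat.factorial : Nat) : Int)

-- ===== PRECONDITION & SPEC =====
def Spec_almost_double_factorial (n : Int) (out : Int) : Prop := out = almost_double_factorial_alt n
instance (n : Int) (out : Int) : Decidable (Spec_almost_double_factorial n out) := by unfold Spec_almost_double_factorial; infer_instance

-- ===== CLAIM (what is proved, stated in full; the proofs are below) =====
def Claim_equal_almost_double_factorial : Prop := ∀ (n : Int), Dom_almost_double_factorial n → Spec_almost_double_factorial n (almost_double_factorial n)

-- ===== LEMMAS AND PROOFS =====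

-- product of the first k odd numbers 1·3·⋯·(2k-1)
def oddProdN : Nat → Nat
  | 0 => 1
  | k + 1 => oddProdN k * (2 * k + 1)

lemma fact_double (k : Nat) : (2 * k).factorial = 2 ^ k * k.factorial * oddProdN k := by
  induction k with
  | zero => simp [oddProdN]
  | succ k ih =>
    have h : 2 * (k + 1) = (2 * k + 1) + 1 := by ring
    rw [h, Nat.factorial_succ, Nat.factorial_succ, ih, oddProdN, Nat.factorial_succ]
    ring

lemma foldl_odd (k : Nat) :
    ((List.range k).map (fun j : Nat => (1 : Int) + 2 * (j : Int))).foldl (fun prod i => prod * i) 1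
      = (oddProdN k : Int) := by
  induction k with
  | zero => simp [oddProdN]
  | succ k ih =>
    rw [List.range_succ, List.map_append, List.foldl_append, ih]
    simp only [List.map_cons, List.map_nil, List.foldl_cons, List.foldl_nil, oddProdN]
    push_cast
    ring

lemma oddProd_div (k : Nat) : (2 ^ k * k.factorial * oddProdN k) / (2 ^ k * k.factorial) = oddProdN k := by
  rw [Nat.mul_div_cancel_left _ (by positivity)]

-- ===== VERDICT (by name: the statement is the Claim_ definition above) =====
theorem almost_double_factorial_spec : Claim_equal_almost_double_factorial := by
  intro n _
  unfold Spec_almost_double_factorial almost_double_factorial almost_double_factorial_alt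
  by_cases h01 : n = 0 ∨ n = 1
  · rcases h01 with rfl | rfl <;> decide
  · rw [if_neg h01]
    by_cases hneg : n + 1 ≤ 0
    · have hr : PySem.List.pyRange 1 (n + 1) 2 = [] := by
        rw [PySem.List.pyRange_of_pos _ _ (by norm_num), if_neg (by omega)]
        simp
      have hk : max 0 (PySem.Int.floordiv (n + 1) 2) = 0 := by
        have := PySem.Int.floordiv_mul_add_mod (n + 1) 2
        have hm := PySem.Int.mod_nonneg (n + 1) (b := 2) (by norm_num)
        have hm2 := PySem.Int.mod_lt (n + 1) (b := 2) (by norm_num)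
        omega
      rw [hr, hk]
      decide
    · -- n ≥ 2 here
      have hn2 : 2 ≤ n := by omega
      have hfd : PySem.Int.floordiv (n + 1) 2 = (n + 1) / 2 :=
        PySem.Int.floordiv_eq_ediv_of_pos (by norm_num)
      have hknn : 0 ≤ (n + 1) / 2 := by positivity
      have hk : max 0 (PySem.Int.floordiv (n + 1) 2) = (n + 1) / 2 := by
        rw [hfd]; omega
      set k : Nat := ((n + 1) / 2).toNat with hkdef
      have hr : PySem.List.pyRange 1 (n + 1) 2
          = (List.range k).map (fun j : Nat => (1 : Int) + 2 * (j : Int)) := by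
        rw [PySem.List.pyRange_of_pos _ _ (by norm_num), if_pos (by omega)]
        rw [hkdef]
        congr 2
        omega
      rw [hr, foldl_odd, hk]
      show (oddProdN k : Int) = PySem.Int.floordiv ((2 * ((n + 1) / 2).toNat).factorial : Int)
        ((2 ^ ((n + 1) / 2).toNat * ((n + 1) / 2).toNat.factorial : Nat) : Int)
      rw [← hkdef, fact_double, PySem.Int.floordiv_natCast, oddProd_div]
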